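-- pv_equiv track=rewrite | github.com/danhdoan/project-euler | solutions/p98_anagramic_squares.py | tryConvert
-- ===== SOURCE A (Python) =====
-- def tryConvert(w, x):
--     """Try to convert a word to an integer"""
--
--     d = {}
--     hist = set()
--     for i in range(len(w) - 1, -1, -1):
--         last = x % 10
--         if w[i] in d:
--             if d[w[i]] != last:
--                 return False, None
--         else:
--             if last in hist:
--                 return False, None
--             else:
--                 d[w[i]] = last
--                 hist.add(last)
--         x //= 10
--     return True, d
-- ===== SOURCE B (Python) =====
-- def tryConvert(w, x):
--     """Try to convert a word to an integer"""
--
--     digits = []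
--     for _ in range(len(w)):
--         digits.append(x % 10)
--         x //= 10
--     chars = list(reversed(w))
--     pairs = list(zip(chars, digits))
--     if len(set(pairs)) == len(set(chars)) == len(set(digits)):
--         return True, dict(pairs)
--     return False, None
-- ===== Notes on version B (the rewrite author's own statement) =====
-- stated objective: alternative
-- what changed: Replaces the incremental right-to-left scan that maintains a char-to-digit dict and a used-digit set with early rejects by a closed-form check: build the aligned digit list, zip it with the reversed characters, and decide bijectivity by comparing the sizes of the distinct-pair, distinct-char and distinct-digit sets, returning dict(pairs) on success.
import Mathlib
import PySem

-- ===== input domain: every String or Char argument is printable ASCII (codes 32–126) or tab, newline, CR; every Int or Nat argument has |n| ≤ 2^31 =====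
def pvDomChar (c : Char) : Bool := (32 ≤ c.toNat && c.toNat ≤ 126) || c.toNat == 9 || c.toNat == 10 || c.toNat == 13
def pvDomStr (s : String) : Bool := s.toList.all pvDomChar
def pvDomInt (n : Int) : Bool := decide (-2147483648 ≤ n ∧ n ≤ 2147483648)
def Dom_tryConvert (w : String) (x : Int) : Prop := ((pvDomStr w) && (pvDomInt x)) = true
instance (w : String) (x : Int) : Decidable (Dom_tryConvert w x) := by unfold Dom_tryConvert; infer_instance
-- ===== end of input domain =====

-- B replaces A's incremental scan-with-rejection (dict + used-digit set) by a closed-form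
-- bijectivity test comparing distinct-set sizes of the zipped (char, digit) pairs; alternative
-- decomposition, same O(n) cost.


-- ===== PORT A =====
-- the loop 'for i in range(len(w)-1,-1,-1)' visits w's characters from the last to the first:
-- structural recursion over w.toList.reverse carrying (x, d, hist)
def tryConvertLoop (cs : List Char) (x : Int) (d : PySem.Dict String Int)
    (hist : PySem.Set Int) : Bool × (Option (List (String × Int))) :=
  match cs with
  | [] => (true, some d.items)
  | c :: rest =>
    let last := PySem.Int.mod x 10
    let s := String.ofList [c]
    if d.contains s then
      if d.getD s 0 ≠ last then (false, none)
      else tryConvertLoop rest (PySem.Int.floordiv x 10) d hist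
    else
      if PySem.Set.contains hist last then (false, none)
      else tryConvertLoop rest (PySem.Int.floordiv x 10) (d.insert s last) (PySem.Set.add hist last)

def tryConvert (w : String) (x : Int) : Bool × (Option (List (String × Int))) :=
  tryConvertLoop w.toList.reverse x PySem.Dict.empty PySem.Set.empty

-- ===== PORT B =====
def tryConvert_alt (w : String) (x : Int) : Bool × (Option (List (String × Int))) :=
  -- 'for _ in range(len(w)): digits.append(x % 10); x //= 10'
  let digits : List Int :=
    ((List.range w.toList.length).foldl
      (fun (st : Int × List Int) _ => (PySem.Int.floordiv st.1 10, st.2 ++ [PySem.Int.mod st.1 10]))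
      (x, [])).2
  let chars : List String := w.toList.reverse.map (fun c => String.ofList [c])
  let pairs : List (String × Int) := chars.zip digits
  if (PySem.Set.ofList pairs).length = (PySem.Set.ofList chars).length ∧
      (PySem.Set.ofList chars).length = (PySem.Set.ofList digits).length then
    (true, some ((pairs.foldl (fun d p => d.insert p.1 p.2) (PySem.Dict.empty : PySem.Dict String Int)).items))
  else (false, none)

-- ===== PRECONDITION & SPEC =====
def Spec_tryConvert (w : String) (x : Int) (out : Bool × (Option (List (String × Int)))) : Prop := out = tryConvert_alt w x
instance (w : String) (x : Int) (out : Bool × (Option (List (String × Int)))) : Decidable (Spec_tryConvert w x out) := by unfold Spec_tryConvert; infer_instance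

-- ===== CLAIM (what is proved, stated in full; the proofs are below) =====
def Claim_equal_tryConvert : Prop := ∀ (w : String) (x : Int), Dom_tryConvert w x → Spec_tryConvert w x (tryConvert w x)

-- ===== LEMMAS AND PROOFS =====

-- the aligned digit list and pair list both programs are about
def pvDigits (x : Int) (n : Nat) : List Int :=
  (List.range n).map (fun j => PySem.Int.mod (PySem.Int.floordiv x ((10 : Int) ^ j)) 10)

def pvPairs (w : String) (x : Int) : List (String × Int) :=
  (w.toList.reverse.map (fun c => String.ofList [c])).zip (pvDigits x w.toList.length)

-- A's loop with the digit extraction factored out: the same scan over an explicit pair list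
def pvChk : List (String × Int) → PySem.Dict String Int → PySem.Set Int →
    Bool × (Option (List (String × Int)))
  | [], d, _ => (true, some d.items)
  | (c, dg) :: r, d, h =>
    if d.contains c then
      if d.getD c 0 ≠ dg then (false, none) else pvChk r d h
    else
      if PySem.Set.contains h dg then (false, none)
      else pvChk r (d.insert c dg) (PySem.Set.add h dg)

def pvDictOf (P : List (String × Int)) : PySem.Dict String Int :=
  P.foldl (fun d p => d.insert p.1 p.2) PySem.Dict.empty

def pvHistOf (P : List (String × Int)) : PySem.Set Int := PySem.Set.ofList (P.map Prod.snd)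

-- functionality (fst determines the pair) and injectivity (snd determines the pair)
def pvFn (L : List (String × Int)) : Prop := ∀ p ∈ L, ∀ q ∈ L, p.1 = q.1 → p = q
def pvIj (L : List (String × Int)) : Prop := ∀ p ∈ L, ∀ q ∈ L, p.2 = q.2 → p = q

lemma pvFloordiv_floordiv (x : Int) (j : Nat) :
    PySem.Int.floordiv (PySem.Int.floordiv x 10) ((10 : Int) ^ j) = PySem.Int.floordiv x ((10 : Int) ^ (j + 1)) := by
  rw [PySem.Int.floordiv_eq_ediv_of_pos (b := 10) (by norm_num),
      PySem.Int.floordiv_eq_ediv_of_pos (by positivity),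
      PySem.Int.floordiv_eq_ediv_of_pos (by positivity),
      Int.ediv_ediv_of_nonneg (by norm_num)]
  ring_nf

lemma pvDigits_succ (x : Int) (n : Nat) :
    pvDigits x (n + 1) = PySem.Int.mod x 10 :: pvDigits (PySem.Int.floordiv x 10) n := by
  unfold pvDigits
  rw [List.range_succ_eq_map, List.map_cons, List.map_map]
  congr 1
  · norm_num [PySem.Int.floordiv]
  · refine List.map_congr_left fun j _ => ?_
    simp only [Function.comp_apply, Nat.succ_eq_add_one]
    rw [← pvFloordiv_floordiv]

lemma pvDigits_loop (n : Nat) : ∀ (x : Int) (acc : List Int),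
    ((List.range n).foldl
      (fun (st : Int × List Int) _ => (PySem.Int.floordiv st.1 10, st.2 ++ [PySem.Int.mod st.1 10]))
      (x, acc)).2 = acc ++ pvDigits x n := by
  induction n with
  | zero => intro x acc; simp [pvDigits]
  | succ n ih =>
    intro x acc
    rw [List.range_succ_eq_map, List.foldl_cons, List.foldl_map, ih, pvDigits_succ]
    simp

lemma pvLoop_eq_chk (cs : List Char) : ∀ (x : Int) d h,
    tryConvertLoop cs x d h = pvChk ((cs.map (fun c => String.ofList [c])).zip (pvDigits x cs.length)) d h := by
  induction cs with
  | nil => intro x d h; rfl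
  | cons c rest ih =>
    intro x d h
    rw [List.length_cons, pvDigits_succ, List.map_cons, List.zip_cons_cons]
    simp only [tryConvertLoop, pvChk]
    rw [ih, ih]

lemma pvNodup_keys_dictOf (P : List (String × Int)) : (pvDictOf P).keys.Nodup :=
  PySem.Dict.nodup_keys_foldl_insert_key P Prod.fst (fun _ p => p.2) PySem.Dict.empty
    (by simp)

lemma pvKeys_dictOf (P : List (String × Int)) :
    (pvDictOf P).keys = PySem.Set.ofList (P.map Prod.fst) := by
  unfold pvDictOf
  rw [PySem.Dict.keys_foldl_insert_key P Prod.fst (fun _ p => p.2) PySem.Dict.empty]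
  simp [PySem.Dict.keys_empty, PySem.Set.update_nil_left]

lemma pvGet?_dictOf_mem_aux (P : List (String × Int)) :
    ∀ (d : PySem.Dict String Int) (c : String) (v : Int),
      (P.foldl (fun d p => d.insert p.1 p.2) d).get? c = some v → (c, v) ∈ P ∨ d.get? c = some v := by
  induction P with
  | nil => intro d c v h; exact Or.inr h
  | cons p r ih =>
    intro d c v h
    rcases ih (d.insert p.1 p.2) c v h with h1 | h1
    · exact Or.inl (List.mem_cons_of_mem _ h1)
    · rw [PySem.Dict.get?_insert] at h1
      split_ifs at h1 with hc
      · left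
        obtain ⟨c1, v1⟩ := p
        simp only at hc
        simp only [Option.some.injEq] at h1
        subst hc; subst h1
        exact List.mem_cons_self
      · exact Or.inr h1

lemma pvGet?_dictOf_mem {P : List (String × Int)} {c : String} {v : Int}
    (h : (pvDictOf P).get? c = some v) : (c, v) ∈ P := by
  rcases pvGet?_dictOf_mem_aux P PySem.Dict.empty c v h with h1 | h1
  · exact h1
  · simp [PySem.Dict.get?_empty] at h1

lemma pvNot_mem_of_get?_none {P : List (String × Int)} {c : String}
    (h : (pvDictOf P).get? c = none) : ∀ v, (c, v) ∉ P := by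
  intro v hv
  rw [PySem.Dict.get?_eq_none_iff_not_mem_keys, pvKeys_dictOf, PySem.Set.mem_ofList] at h
  exact h (List.mem_map.mpr ⟨(c, v), hv, rfl⟩)

lemma pvEq_of_mem_items {d : PySem.Dict String Int} (hnd : d.keys.Nodup)
    {p q : String × Int} (hp : p ∈ d.items) (hq : q ∈ d.items) (h1 : p.1 = q.1) : p = q := by
  have : (d.items.map Prod.fst).Nodup := hnd
  exact List.inj_on_of_nodup_map this hp hq h1

lemma pvInsert_self {d : PySem.Dict String Int} (hnd : d.keys.Nodup) {c : String} {v : Int}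
    (h : d.get? c = some v) : d.insert c v = d := by
  apply PySem.Dict.ext
  have hcont : d.contains c = true := by rw [PySem.Dict.contains_eq_isSome_get?, h]; rfl
  rw [PySem.Dict.items_insert_of_contains d v hcont]
  have hcv : (c, v) ∈ d.items := PySem.Dict.mem_items_of_get?_eq_some d h
  have hid : ∀ p ∈ d.items, (if (p.1 == c) = true then (c, v) else p) = p := by
    intro p hp
    by_cases hpc : p.1 = c
    · have : p = (c, v) := pvEq_of_mem_items hnd hp hcv (by simpa using hpc)
      simp [this]
    · simp [hpc]
  rw [List.map_congr_left hid]
  simp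

lemma pvDictOf_append_singleton (P : List (String × Int)) (p : String × Int) :
    pvDictOf (P ++ [p]) = (pvDictOf P).insert p.1 p.2 := by
  simp [pvDictOf]

lemma pvHistOf_append_singleton (P : List (String × Int)) (p : String × Int) :
    pvHistOf (P ++ [p]) = PySem.Set.add (pvHistOf P) p.2 := by
  simp [pvHistOf, PySem.Set.ofList_append_singleton]

-- success run: if the whole pair list is functional and injective, the scan accepts and
-- returns dict(all pairs)
lemma pvChk_success : ∀ (ps P : List (String × Int)), pvFn (P ++ ps) → pvIj (P ++ ps) →
    pvChk ps (pvDictOf P) (pvHistOf P) = (true, some (pvDictOf (P ++ ps)).items) := by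
  intro ps
  induction ps with
  | nil => intro P _ _; simp [pvChk]
  | cons p r ih =>
    obtain ⟨c, dg⟩ := p
    intro P hFn hIj
    have hmemF : (c, dg) ∈ P ++ (c, dg) :: r := by simp
    rw [pvChk]
    by_cases hc : (pvDictOf P).contains c
    · rw [if_pos hc]
      obtain ⟨v, hv⟩ : ∃ v, (pvDictOf P).get? c = some v := by
        rw [PySem.Dict.contains_eq_isSome_get?] at hc
        exact Option.isSome_iff_exists.mp hc
      have hvP : (c, v) ∈ P := pvGet?_dictOf_mem hv
      have hveq : v = dg := by
        have := hFn (c, v) (List.mem_append_left _ hvP) (c, dg) hmemF rfl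
        simpa using congrArg Prod.snd this
      subst hveq
      rw [PySem.Dict.getD_of_get?_eq_some _ 0 hv, if_neg (by simp)]
      have hD : pvDictOf (P ++ [(c, v)]) = pvDictOf P := by
        rw [pvDictOf_append_singleton]
        exact pvInsert_self (pvNodup_keys_dictOf P) hv
      have hH : pvHistOf (P ++ [(c, v)]) = pvHistOf P := by
        rw [pvHistOf_append_singleton]
        exact PySem.Set.add_of_mem (by
          simp only [pvHistOf, PySem.Set.mem_ofList]
          exact List.mem_map.mpr ⟨(c, v), hvP, rfl⟩)
      rw [← hD, ← hH, ih (P ++ [(c, v)]) (by simpa using hFn) (by simpa using hIj)]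
      simp
    · rw [if_neg hc]
      have hnone : (pvDictOf P).get? c = none := by
        cases hget : (pvDictOf P).get? c with
        | none => rfl
        | some v =>
          exact absurd (by rw [PySem.Dict.contains_eq_isSome_get?, hget]; rfl) hc
      have hnmem := pvNot_mem_of_get?_none hnone
      have hhist : PySem.Set.contains (pvHistOf P) dg = false := by
        cases hcb : PySem.Set.contains (pvHistOf P) dg with
        | false => rfl
        | true =>
          exfalso
          rw [PySem.Set.contains_iff, pvHistOf, PySem.Set.mem_ofList] at hcb
          obtain ⟨p', hmem, hdg⟩ := List.mem_map.mp hcb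
          have hpe : p' = (c, dg) := hIj p' (List.mem_append_left _ hmem) (c, dg) hmemF hdg
          exact hnmem dg (hpe ▸ hmem)
      rw [hhist, if_neg (by simp)]
      have hD : pvDictOf (P ++ [(c, dg)]) = (pvDictOf P).insert c dg :=
        pvDictOf_append_singleton P (c, dg)
      have hH : pvHistOf (P ++ [(c, dg)]) = PySem.Set.add (pvHistOf P) dg :=
        pvHistOf_append_singleton P (c, dg)
      rw [← hD, ← hH, ih (P ++ [(c, dg)]) (by simpa using hFn) (by simpa using hIj)]
      simp

-- failing run: if the whole list is not functional-and-injective, the scan rejects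
lemma pvChk_fail : ∀ (ps P : List (String × Int)), pvFn P → pvIj P →
    ¬(pvFn (P ++ ps) ∧ pvIj (P ++ ps)) →
    pvChk ps (pvDictOf P) (pvHistOf P) = (false, none) := by
  intro ps
  induction ps with
  | nil => intro P hFn hIj hno; exact absurd ⟨by simpa using hFn, by simpa using hIj⟩ hno
  | cons p r ih =>
    obtain ⟨c, dg⟩ := p
    intro P hFn hIj hno
    rw [pvChk]
    by_cases hc : (pvDictOf P).contains c
    · rw [if_pos hc]
      obtain ⟨v, hv⟩ : ∃ v, (pvDictOf P).get? c = some v := by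
        rw [PySem.Dict.contains_eq_isSome_get?] at hc
        exact Option.isSome_iff_exists.mp hc
      have hvP : (c, v) ∈ P := pvGet?_dictOf_mem hv
      rw [PySem.Dict.getD_of_get?_eq_some _ 0 hv]
      by_cases hvd : v = dg
      · subst hvd
        rw [if_neg (by simp)]
        have hmemP' : ∀ q, q ∈ P ++ [(c, v)] ↔ q ∈ P := by
          intro q; simp only [List.mem_append, List.mem_singleton]
          exact ⟨fun h => h.elim id (fun h => h ▸ hvP), Or.inl⟩
        have hFn' : pvFn (P ++ [(c, v)]) := fun p hp q hq h =>
          hFn p ((hmemP' p).mp hp) q ((hmemP' q).mp hq) h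
        have hIj' : pvIj (P ++ [(c, v)]) := fun p hp q hq h =>
          hIj p ((hmemP' p).mp hp) q ((hmemP' q).mp hq) h
        have hD : pvDictOf (P ++ [(c, v)]) = pvDictOf P := by
          rw [pvDictOf_append_singleton]
          exact pvInsert_self (pvNodup_keys_dictOf P) hv
        have hH : pvHistOf (P ++ [(c, v)]) = pvHistOf P := by
          rw [pvHistOf_append_singleton]
          exact PySem.Set.add_of_mem (by
            simp only [pvHistOf, PySem.Set.mem_ofList]
            exact List.mem_map.mpr ⟨(c, v), hvP, rfl⟩)
        rw [← hD, ← hH]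
        exact ih (P ++ [(c, v)]) hFn' hIj' (by simpa using hno)
      · rw [if_pos (by simpa using hvd)]
    · rw [if_neg hc]
      have hnone : (pvDictOf P).get? c = none := by
        cases hget : (pvDictOf P).get? c with
        | none => rfl
        | some v => exact absurd (by rw [PySem.Dict.contains_eq_isSome_get?, hget]; rfl) hc
      have hnmem := pvNot_mem_of_get?_none hnone
      cases hhist : PySem.Set.contains (pvHistOf P) dg with
      | true => rw [if_pos (by simp)]
      | false =>
        rw [if_neg (by simp)]
        have hdgfresh : ∀ c', (c', dg) ∉ P := by
          intro c' hmem
          have : dg ∈ pvHistOf P := by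
            rw [pvHistOf, PySem.Set.mem_ofList]
            exact List.mem_map.mpr ⟨(c', dg), hmem, rfl⟩
          rw [← PySem.Set.contains_iff, hhist] at this
          exact Bool.false_ne_true this
        have hFn' : pvFn (P ++ [(c, dg)]) := by
          rintro ⟨p1, p2⟩ hp ⟨q1, q2⟩ hq h
          simp only at h
          rcases List.mem_append.mp hp with hp' | hp'
          · rcases List.mem_append.mp hq with hq' | hq'
            · exact hFn _ hp' _ hq' h
            · have hq2 : q1 = c ∧ q2 = dg := by simpa using hq'
              rw [show p1 = c from h.trans hq2.1] at hp'
              exact absurd hp' (hnmem p2)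
          · have hp2 : p1 = c ∧ p2 = dg := by simpa using hp'
            rcases List.mem_append.mp hq with hq' | hq'
            · rw [show q1 = c from h.symm.trans hp2.1] at hq'
              exact absurd hq' (hnmem q2)
            · have hq2 : q1 = c ∧ q2 = dg := by simpa using hq'
              simp [hp2.1, hp2.2, hq2.1, hq2.2]
        have hIj' : pvIj (P ++ [(c, dg)]) := by
          rintro ⟨p1, p2⟩ hp ⟨q1, q2⟩ hq h
          simp only at h
          rcases List.mem_append.mp hp with hp' | hp'
          · rcases List.mem_append.mp hq with hq' | hq'
            · exact hIj _ hp' _ hq' h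
            · have hq2 : q1 = c ∧ q2 = dg := by simpa using hq'
              rw [show p2 = dg from h.trans hq2.2] at hp'
              exact absurd hp' (hdgfresh p1)
          · have hp2 : p1 = c ∧ p2 = dg := by simpa using hp'
            rcases List.mem_append.mp hq with hq' | hq'
            · rw [show q2 = dg from h.symm.trans hp2.2] at hq'
              exact absurd hq' (hdgfresh q1)
            · have hq2 : q1 = c ∧ q2 = dg := by simpa using hq'
              simp [hp2.1, hp2.2, hq2.1, hq2.2]
        rw [← pvDictOf_append_singleton P (c, dg), ← pvHistOf_append_singleton P (c, dg)]
        exact ih (P ++ [(c, dg)]) hFn' hIj' (by simpa using hno)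

-- distinct-set size = Finset cardinality
lemma pvLen_ofList_eq_card {α : Type} [BEq α] [LawfulBEq α] [DecidableEq α] (xs : List α) :
    (PySem.Set.ofList xs).length = xs.toFinset.card := by
  have h1 : (PySem.Set.ofList xs).toFinset = xs.toFinset := by
    ext a; simp [PySem.Set.mem_ofList]
  rw [← h1, List.toFinset_card_of_nodup (PySem.Set.nodup_ofList xs)]

lemma pvToFinset_map {α β : Type} [DecidableEq α] [DecidableEq β] (l : List α) (f : α → β) :
    (l.map f).toFinset = l.toFinset.image f := by
  ext a; simp

-- B's three-way size equality is exactly functionality + injectivity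
lemma pvCard_cond_iff (L : List (String × Int)) :
    ((PySem.Set.ofList L).length = (PySem.Set.ofList (L.map Prod.fst)).length ∧
      (PySem.Set.ofList (L.map Prod.fst)).length = (PySem.Set.ofList (L.map Prod.snd)).length) ↔
    (pvFn L ∧ pvIj L) := by
  rw [pvLen_ofList_eq_card, pvLen_ofList_eq_card, pvLen_ofList_eq_card,
      pvToFinset_map, pvToFinset_map]
  have hFn : pvFn L ↔ Set.InjOn Prod.fst (L.toFinset : Set (String × Int)) := by
    constructor
    · intro h p hp q hq heq
      exact h p (List.mem_toFinset.mp hp) q (List.mem_toFinset.mp hq) heq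
    · intro h p hp q hq heq
      exact h (List.mem_toFinset.mpr hp) (List.mem_toFinset.mpr hq) heq
  have hIj : pvIj L ↔ Set.InjOn Prod.snd (L.toFinset : Set (String × Int)) := by
    constructor
    · intro h p hp q hq heq
      exact h p (List.mem_toFinset.mp hp) q (List.mem_toFinset.mp hq) heq
    · intro h p hp q hq heq
      exact h (List.mem_toFinset.mpr hp) (List.mem_toFinset.mpr hq) heq
  rw [hFn, hIj]
  constructor
  · rintro ⟨h1, h2⟩
    have hf : Set.InjOn Prod.fst (L.toFinset : Set (String × Int)) := Finset.card_image_iff.mp h1.symm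
    have hs : Set.InjOn Prod.snd (L.toFinset : Set (String × Int)) := Finset.card_image_iff.mp (h2.symm.trans h1.symm)
    exact ⟨hf, hs⟩
  · rintro ⟨hf, hs⟩
    rw [Finset.card_image_of_injOn hf, Finset.card_image_of_injOn hs]
    exact ⟨rfl, rfl⟩

lemma pvMap_fst_pairs (w : String) (x : Int) :
    (pvPairs w x).map Prod.fst = w.toList.reverse.map (fun c => String.ofList [c]) := by
  unfold pvPairs
  rw [List.map_fst_zip]
  simp [pvDigits]

lemma pvMap_snd_pairs (w : String) (x : Int) :
    (pvPairs w x).map Prod.snd = pvDigits x w.toList.length := by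
  unfold pvPairs
  rw [List.map_snd_zip]
  simp [pvDigits]

lemma pvA_eq_chk (w : String) (x : Int) :
    tryConvert w x = pvChk (pvPairs w x) (pvDictOf []) (pvHistOf []) := by
  unfold tryConvert pvPairs
  rw [pvLoop_eq_chk]
  simp [pvDictOf, pvHistOf, PySem.Set.ofList]

-- ===== VERDICT (by name: the statement is the Claim_ definition above) =====
theorem tryConvert_spec : Claim_equal_tryConvert := by
  unfold Claim_equal_tryConvert Spec_tryConvert
  intro w x _
  have hB : tryConvert_alt w x =
      if (PySem.Set.ofList (pvPairs w x)).length = (PySem.Set.ofList ((pvPairs w x).map Prod.fst)).length ∧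
          (PySem.Set.ofList ((pvPairs w x).map Prod.fst)).length = (PySem.Set.ofList ((pvPairs w x).map Prod.snd)).length then
        (true, some (pvDictOf (pvPairs w x)).items)
      else (false, none) := by
    simp only [tryConvert_alt]
    rw [pvDigits_loop, List.nil_append, pvMap_fst_pairs, pvMap_snd_pairs]
    rfl
  rw [pvA_eq_chk, hB]
  by_cases h : pvFn (pvPairs w x) ∧ pvIj (pvPairs w x)
  · rw [if_pos ((pvCard_cond_iff (pvPairs w x)).mpr h)]
    have := pvChk_success (pvPairs w x) [] (by simpa using h.1) (by simpa using h.2)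
    simpa using this
  · rw [if_neg (fun hc => h ((pvCard_cond_iff (pvPairs w x)).mp hc))]
    exact pvChk_fail (pvPairs w x) [] (by intro p hp; simp at hp) (by intro p hp; simp at hp) (by simpa using h)
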